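-- pv_equiv track=rewrite | github.com/karhelmi/tiralabra | src/musiikki.py | n_pituiset_nuottijonot
-- ===== SOURCE A (Python) =====
-- def n_pituiset_nuottijonot(nuotit_lukuina_lista, n):
--     """Jaottelee nuottilistan luvut n-nuotin osajonoihin.
--
--     Args:
--         nuotit_lukuina_lista (list): Lista, jossa nuotit lukuina.
--         n (int): haluttu nuottien osajonojen pituus.
--
--     Returns:
--         list: Palauttaa listan, jossa annetun kappaleen kaikki n-pituiset osajonot listana.
--     """
--     indeksi = 0
--     kierros = 0
--     nuottijono = []
--     nuottijonojen_lista = []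
--     for nuottinumero in nuotit_lukuina_lista:
--         while indeksi < n + kierros and indeksi < len(nuotit_lukuina_lista):
--             nuottijono.append(nuotit_lukuina_lista[indeksi])
--             indeksi += 1
--         if len(nuottijono) == n:
--             nuottijonojen_lista.append(nuottijono)
--             nuottijono = []
--             kierros += 1
--             indeksi = kierros
--     return nuottijonojen_lista
-- ===== SOURCE B (Python) =====
-- def n_pituiset_nuottijonot(nuotit_lukuina_lista, n):
--     nuottijonojen_lista = []
--     for i in range(len(nuotit_lukuina_lista)):
--         osajono = nuotit_lukuina_lista[i:i + n]
--         if len(osajono) == n: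
--             nuottijonojen_lista.append(osajono)
--     return nuottijonojen_lista
-- ===== Notes on version B (the rewrite author's own statement) =====
-- stated objective: simpler
-- what changed: Replaces A's four-variable state machine (indeksi/kierros cursor with an inner element-by-element append-and-reset while loop) by a single stateless index loop that takes the slice lst[i:i+n] and keeps it when its length is n.
import Mathlib
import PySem

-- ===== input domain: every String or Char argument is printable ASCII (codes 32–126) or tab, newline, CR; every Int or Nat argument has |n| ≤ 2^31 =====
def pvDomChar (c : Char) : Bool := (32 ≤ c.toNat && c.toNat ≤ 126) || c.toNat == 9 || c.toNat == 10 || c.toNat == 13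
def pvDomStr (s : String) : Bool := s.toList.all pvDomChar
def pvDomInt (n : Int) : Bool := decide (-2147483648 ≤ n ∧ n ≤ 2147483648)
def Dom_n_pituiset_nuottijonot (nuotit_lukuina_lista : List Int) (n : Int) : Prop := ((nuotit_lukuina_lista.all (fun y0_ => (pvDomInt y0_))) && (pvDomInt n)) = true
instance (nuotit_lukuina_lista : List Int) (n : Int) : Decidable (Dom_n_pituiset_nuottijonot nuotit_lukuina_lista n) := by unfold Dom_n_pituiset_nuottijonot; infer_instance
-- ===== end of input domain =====

-- B replaces A's indeksi/kierros state machine with a stateless index loop over slices (objective: simpler).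

-- ===== PORT A =====
-- the inner 'while indeksi < n + kierros and indeksi < len(lst)' loop;
-- indeksi/kierros are always nonnegative in A, so they are carried as Nat;
-- the guard gives indeksi < lst.length, so lst.getD indeksi 0 is exactly lst[indeksi].
def pvWhileA (lst : List Int) (n : Int) (kierros indeksi : Nat) (jono : List Int) :
    Nat × List Int :=
  if h : (indeksi : Int) < n + kierros ∧ indeksi < lst.length then
    pvWhileA lst n kierros (indeksi + 1) (jono ++ [lst.getD indeksi 0])
  else (indeksi, jono)
termination_by lst.length - indeksi
decreasing_by omega

-- the body of A's for-loop; state = (indeksi, kierros, nuottijono, nuottijonojen_lista)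
def pvStepA (lst : List Int) (n : Int)
    (st : Nat × Nat × List Int × List (List Int)) :
    Nat × Nat × List Int × List (List Int) :=
  let r := pvWhileA lst n st.2.1 st.1 st.2.2.1
  if (r.2.length : Int) = n then
    (st.2.1 + 1, st.2.1 + 1, ([] : List Int), st.2.2.2 ++ [r.2])
  else (r.1, st.2.1, r.2, st.2.2.2)

def n_pituiset_nuottijonot (nuotit_lukuina_lista : List Int) (n : Int) : List (List Int) :=
  (nuotit_lukuina_lista.foldl
    (fun st _ => pvStepA nuotit_lukuina_lista n st)
    (0, 0, ([] : List Int), ([] : List (List Int)))).2.2.2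

-- ===== PORT B =====
def n_pituiset_nuottijonot_alt (nuotit_lukuina_lista : List Int) (n : Int) : List (List Int) :=
  (PySem.List.pyRange 0 nuotit_lukuina_lista.length 1).foldl
    (fun tulos i =>
      let osajono := PySem.List.slice nuotit_lukuina_lista (some i) (some (i + n))
      if (osajono.length : Int) = n then tulos ++ [osajono] else tulos)
    []

-- ===== PRECONDITION & SPEC =====
def Spec_n_pituiset_nuottijonot (nuotit_lukuina_lista : List Int) (n : Int) (out : List (List Int)) : Prop := out = n_pituiset_nuottijonot_alt nuotit_lukuina_lista n
instance (nuotit_lukuina_lista : List Int) (n : Int) (out : List (List Int)) : Decidable (Spec_n_pituiset_nuottijonot nuotit_lukuina_lista n out) := by unfold Spec_n_pituiset_nuottijonot; infer_instance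

-- ===== CLAIM (what is proved, stated in full; the proofs are below) =====
def Claim_equal_n_pituiset_nuottijonot : Prop := ∀ (nuotit_lukuina_lista : List Int) (n : Int), Dom_n_pituiset_nuottijonot nuotit_lukuina_lista n → Spec_n_pituiset_nuottijonot nuotit_lukuina_lista n (n_pituiset_nuottijonot nuotit_lukuina_lista n)

-- ===== LEMMAS AND PROOFS =====

-- the window starting at i
def pvWin (lst : List Int) (nn i : Nat) : List Int := (lst.drop i).take nn

def pvWins (lst : List Int) (nn m : Nat) : List (List Int) :=
  (List.range m).map (pvWin lst nn)

lemma pvFoldlConstIterate {α β : Type} (g : β → β) :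
    ∀ (l : List α) (s : β), l.foldl (fun s _ => g s) s = g^[l.length] s := by
  intro l
  induction l with
  | nil => intro s; rfl
  | cons a t ih =>
      intro s
      simp [List.foldl, ih, Function.iterate_succ_apply]

lemma pvWhileA_eq (lst : List Int) (n : Int) (k : Nat) :
    ∀ (f i : Nat) (jono : List Int), lst.length - i ≤ f →
      pvWhileA lst n k i jono =
        if (i : Int) < n + k ∧ i < lst.length then
          (min (n + k).toNat lst.length,
           jono ++ (lst.drop i).take (min (n + k).toNat lst.length - i))
        else (i, jono) := by
  intro f
  induction f with
  | zero =>
      intro i jono hf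
      rw [pvWhileA]
      have hiL : ¬ (i < lst.length) := by omega
      simp [hiL]
  | succ f ih =>
      intro i jono hf
      rw [pvWhileA]
      by_cases h : (i : Int) < n + k ∧ i < lst.length
      · rw [dif_pos h, ih (i + 1) (jono ++ [lst.getD i 0]) (by omega), if_pos h]
        have hm1 : i + 1 ≤ min (n + k).toNat lst.length := by omega
        have hdrop : lst.drop i = lst[i] :: lst.drop (i + 1) :=
          List.drop_eq_getElem_cons h.2
        have hgd : lst.getD i 0 = lst[i] := List.getD_eq_getElem lst 0 h.2
        by_cases h2 : (((i : Nat) + 1 : Nat) : Int) < n + k ∧ i + 1 < lst.length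
        · rw [if_pos h2]
          refine congrArg₂ Prod.mk rfl ?_
          rw [hdrop, hgd]
          have heq : min (n + k).toNat lst.length - i =
              (min (n + k).toNat lst.length - (i + 1)) + 1 := by omega
          rw [heq, List.take_succ_cons, List.append_assoc]
          rfl
        · rw [if_neg h2]
          have hmin : min (n + k).toNat lst.length = i + 1 := by
            push_neg at h2
            omega
          refine congrArg₂ Prod.mk (by omega) ?_
          rw [hmin, hdrop, hgd]
          simp
          rw [hdrop]
          rfl
      · rw [dif_neg h, if_neg h]

-- the three shapes pvStepA takes for n ≥ 1
lemma pvStepA_clean (lst : List Int) (n : Int) (hn : 1 ≤ n) (m : Nat)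
    (acc : List (List Int)) (hm : m + n.toNat ≤ lst.length) :
    pvStepA lst n (m, m, [], acc) = (m + 1, m + 1, [], acc ++ [pvWin lst n.toNat m]) := by
  have hc : ((m : Nat) : Int) < n + m ∧ m < lst.length := by
    constructor <;> omega
  have hw := pvWhileA_eq lst n m (lst.length - m) m [] (le_refl _)
  rw [if_pos hc] at hw
  have hmin : min (n + m).toNat lst.length = m + n.toNat := by omega
  unfold pvStepA
  simp only [hw, hmin]
  have hwin : (lst.drop m).take (m + n.toNat - m) = pvWin lst n.toNat m := by
    unfold pvWin
    congr 1
    omega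
  have hlen : (((lst.drop m).take (m + n.toNat - m)).length : Int) = n := by
    rw [List.length_take, List.length_drop]
    have : min (m + n.toNat - m) (lst.length - m) = n.toNat := by omega
    rw [this]
    omega
  rw [hwin] at hlen
  simp only [List.nil_append, hwin, if_pos hlen]

lemma pvStepA_boundary (lst : List Int) (n : Int) (hn : 1 ≤ n) (m : Nat)
    (acc : List (List Int)) (hm1 : m ≤ lst.length) (hm2 : lst.length < m + n.toNat) :
    pvStepA lst n (m, m, [], acc) = (lst.length, m, lst.drop m, acc) := by
  by_cases hmL : m < lst.length
  · have hc : ((m : Nat) : Int) < n + m ∧ m < lst.length := by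
      constructor <;> omega
    have hw := pvWhileA_eq lst n m (lst.length - m) m [] (le_refl _)
    rw [if_pos hc] at hw
    have hmin : min (n + m).toNat lst.length = lst.length := by omega
    unfold pvStepA
    simp only [hw, hmin]
    have hdrop : (lst.drop m).take (lst.length - m) = lst.drop m := by
      apply List.take_of_length_le
      rw [List.length_drop]
    have hlen : ¬ ((((lst.drop m).take (lst.length - m)).length : Int) = n) := by
      rw [hdrop, List.length_drop]
      omega
    rw [hdrop] at hlen
    simp only [List.nil_append, hdrop, if_neg hlen]
  · have hmeq : m = lst.length := by omega
    have hc : ¬ (((m : Nat) : Int) < n + m ∧ m < lst.length) := by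
      push_neg
      intro _
      omega
    have hw := pvWhileA_eq lst n m (lst.length - m) m [] (le_refl _)
    rw [if_neg hc] at hw
    unfold pvStepA
    simp only [hw]
    have hlen : ¬ ((([] : List Int).length : Int) = n) := by
      simp
      omega
    rw [if_neg hlen]
    rw [hmeq]
    simp [List.drop_length]

lemma pvStepA_stuck (lst : List Int) (n : Int) (hn : 1 ≤ n) (m : Nat)
    (acc : List (List Int)) (hm1 : m ≤ lst.length) (hm2 : lst.length < m + n.toNat) :
    pvStepA lst n (lst.length, m, lst.drop m, acc) = (lst.length, m, lst.drop m, acc) := by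
  have hc : ¬ (((lst.length : Nat) : Int) < n + m ∧ lst.length < lst.length) := by
    push_neg
    intro _
    omega
  have hw := pvWhileA_eq lst n m 0 lst.length (lst.drop m) (by omega)
  rw [if_neg hc] at hw
  unfold pvStepA
  simp only [hw]
  have hlen : ¬ (((lst.drop m).length : Int) = n) := by
    rw [List.length_drop]
    omega
  rw [if_neg hlen]

-- state after m iterations, n ≥ 1; j0 = lst.length + 1 - n.toNat (truncated)
lemma pvIterA (lst : List Int) (n : Int) (hn : 1 ≤ n) :
    ∀ m : Nat,
      (pvStepA lst n)^[m] (0, 0, ([] : List Int), ([] : List (List Int))) =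
        if m ≤ lst.length + 1 - n.toNat then
          (m, m, [], pvWins lst n.toNat m)
        else
          (lst.length, lst.length + 1 - n.toNat, lst.drop (lst.length + 1 - n.toNat),
           pvWins lst n.toNat (lst.length + 1 - n.toNat)) := by
  intro m
  induction m with
  | zero =>
      simp [pvWins]
  | succ m ih =>
      rw [Function.iterate_succ_apply', ih]
      set j0 := lst.length + 1 - n.toNat with hj0
      by_cases h1 : m + 1 ≤ j0
      · have hm : m ≤ j0 := by omega
        rw [if_pos hm, if_pos h1]
        have hmn : m + n.toNat ≤ lst.length := by omega
        rw [pvStepA_clean lst n hn m _ hmn]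
        unfold pvWins
        rw [List.range_succ, List.map_append]
        rfl
      · rw [if_neg h1]
        by_cases h2 : m ≤ j0
        · have hmj : m = j0 := by omega
          rw [if_pos h2, hmj]
          exact pvStepA_boundary lst n hn j0 _ (by omega) (by omega)
        · rw [if_neg h2]
          exact pvStepA_stuck lst n hn j0 _ (by omega) (by omega)

-- A's value, by n-cases
lemma pvA_neg (lst : List Int) (n : Int) (hn : n < 0) :
    n_pituiset_nuottijonot lst n = [] := by
  unfold n_pituiset_nuottijonot
  rw [pvFoldlConstIterate]
  have hfix : pvStepA lst n (0, 0, ([] : List Int), ([] : List (List Int))) =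
      (0, 0, [], []) := by
    have hc : ¬ ((((0 : Nat)) : Int) < n + (((0 : Nat)) : Int) ∧ (0 : Nat) < lst.length) := by
      push_neg
      intro h
      omega
    have hw := pvWhileA_eq lst n 0 lst.length 0 [] (by omega)
    rw [if_neg hc] at hw
    unfold pvStepA
    simp only [hw]
    have h0 : ¬ ((0 : Int) = n) := by omega
    simp [h0]
  rw [Function.iterate_fixed hfix]

lemma pvA_zero (lst : List Int) :
    n_pituiset_nuottijonot lst 0 = List.replicate lst.length [] := by
  unfold n_pituiset_nuottijonot
  rw [pvFoldlConstIterate]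
  have key : ∀ m : Nat, (pvStepA lst 0)^[m] (0, 0, ([] : List Int), ([] : List (List Int))) =
      (m, m, [], List.replicate m []) := by
    intro m
    induction m with
    | zero => simp
    | succ m ih =>
        rw [Function.iterate_succ_apply', ih]
        have hc : ¬ (((m : Nat) : Int) < 0 + m ∧ m < lst.length) := by
          push_neg
          intro h
          omega
        have hw := pvWhileA_eq lst 0 m lst.length m [] (by omega)
        rw [if_neg hc] at hw
        unfold pvStepA
        simp only [hw]
        rw [List.replicate_succ']
        simp
  rw [key lst.length]

lemma pvA_pos (lst : List Int) (n : Int) (hn : 1 ≤ n) :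
    n_pituiset_nuottijonot lst n = pvWins lst n.toNat (lst.length + 1 - n.toNat) := by
  unfold n_pituiset_nuottijonot
  rw [pvFoldlConstIterate, pvIterA lst n hn lst.length]
  by_cases h : lst.length ≤ lst.length + 1 - n.toNat
  · rw [if_pos h]
    have : lst.length = lst.length + 1 - n.toNat := by omega
    rw [← this]
  · rw [if_neg h]

-- B's loop, rewritten over List.range
lemma pvB_eq_range (lst : List Int) (n : Int) :
    n_pituiset_nuottijonot_alt lst n =
      (List.range lst.length).foldl
        (fun (tulos : List (List Int)) (k : Nat) =>
          let osajono := PySem.List.slice lst (some (k : Int)) (some ((k : Int) + n))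
          if (osajono.length : Int) = n then tulos ++ [osajono] else tulos) [] := by
  unfold n_pituiset_nuottijonot_alt
  rw [PySem.List.pyRange_zero_nat, List.foldl_map]

lemma pvB_neg (lst : List Int) (n : Int) (hn : n < 0) :
    n_pituiset_nuottijonot_alt lst n = [] := by
  rw [pvB_eq_range]
  rw [PySem.List.foldl_congr_mem (List.range lst.length) _
    (fun (tulos : List (List Int)) (_ : Nat) => tulos) []
    (by
      intro acc k _
      simp only
      have hne : ¬ (((PySem.List.slice lst (some (k : Int)) (some ((k : Int) + n))).length : Int) = n) := by
        omega
      rw [if_neg hne])]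
  simp

lemma pvB_zero (lst : List Int) :
    n_pituiset_nuottijonot_alt lst 0 = List.replicate lst.length [] := by
  rw [pvB_eq_range]
  rw [PySem.List.foldl_congr_mem (List.range lst.length) _
    (fun (tulos : List (List Int)) (_ : Nat) => tulos ++ [[]]) []
    (by
      intro acc k _
      simp only
      have hs : PySem.List.slice lst (some (k : Int)) (some ((k : Int) + (0 : Int))) = [] := by
        have hk : ((k : Int) + (0 : Int)) = ((k : Nat) : Int) := by omega
        rw [hk, PySem.List.slice_natCast]
        simp
      rw [hs]
      simp)]
  induction lst.length with
  | zero => simp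
  | succ L ih =>
      rw [List.range_succ, List.foldl_append, ih, List.replicate_succ']
      simp

lemma pvFoldlRangeWins (lst : List Int) (nn j0 : Nat) :
    ∀ (L : Nat),
      (List.range L).foldl
        (fun tulos k => if k < j0 then tulos ++ [pvWin lst nn k] else tulos) [] =
        pvWins lst nn (min j0 L) := by
  intro L
  induction L with
  | zero => simp [pvWins]
  | succ L ih =>
      rw [List.range_succ, List.foldl_append, ih]
      simp only [List.foldl_cons, List.foldl_nil]
      by_cases h : L < j0
      · rw [if_pos h]
        have h1 : min j0 (L + 1) = L + 1 := by omega
        have h2 : min j0 L = L := by omega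
        rw [h1, h2]
        unfold pvWins
        rw [List.range_succ, List.map_append]
        rfl
      · rw [if_neg h]
        have h1 : min j0 (L + 1) = min j0 L := by omega
        rw [h1]

lemma pvB_pos (lst : List Int) (n : Int) (hn : 1 ≤ n) :
    n_pituiset_nuottijonot_alt lst n = pvWins lst n.toNat (lst.length + 1 - n.toNat) := by
  rw [pvB_eq_range]
  set j0 := lst.length + 1 - n.toNat with hj0
  rw [PySem.List.foldl_congr_mem (List.range lst.length) _
    (fun (tulos : List (List Int)) (k : Nat) =>
      if k < j0 then tulos ++ [pvWin lst n.toNat k] else tulos) []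
    (by
      intro acc k hk
      have hkL : k < lst.length := by simpa using hk
      simp only
      have hcast : ((k : Int) + n) = (((k + n.toNat : Nat)) : Int) := by
        push_cast
        omega
      have hs : PySem.List.slice lst (some (k : Int)) (some ((k : Int) + n)) = pvWin lst n.toNat k := by
        rw [hcast, PySem.List.slice_natCast]
        unfold pvWin
        congr 1
        omega
      rw [hs]
      have hlen : (pvWin lst n.toNat k).length = min n.toNat (lst.length - k) := by
        unfold pvWin
        rw [List.length_take, List.length_drop]
      by_cases hkj : k < j0
      · have hy : ((pvWin lst n.toNat k).length : Int) = n := by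
          rw [hlen]
          omega
        rw [if_pos hy, if_pos hkj]
      · have hy : ¬ (((pvWin lst n.toNat k).length : Int) = n) := by
          rw [hlen]
          omega
        rw [if_neg hy, if_neg hkj])]
  rw [pvFoldlRangeWins lst n.toNat j0 lst.length]
  have hmin : min j0 lst.length = j0 := by omega
  rw [hmin]

-- ===== VERDICT (by name: the statement is the Claim_ definition above) =====
theorem n_pituiset_nuottijonot_spec : Claim_equal_n_pituiset_nuottijonot := by
  intro lst n _
  unfold Spec_n_pituiset_nuottijonot
  rcases lt_trichotomy n 0 with hn | hn | hn
  · rw [pvA_neg lst n hn, pvB_neg lst n hn]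
  · subst hn
    rw [pvA_zero lst, pvB_zero lst]
  · have hn1 : 1 ≤ n := hn
    rw [pvA_pos lst n hn1, pvB_pos lst n hn1]
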